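-- pv_equiv track=rewrite | github.com/rix71/AoC | aoc-2024-py/day23/day23.py | part1
-- ===== SOURCE A (Python) =====
-- from collections import defaultdict
-- from itertools import product
--
-- def part1(net_map) -> int:
--     conns = defaultdict(set)
--     for a, b in net_map:
--         conns[a].add(b)
--         conns[b].add(a)
--
--     nets = set()
--     for a, b, c in product(conns.keys(), conns.keys(), conns.keys()):
--         if (a == b) or (b == c) or (a == c):
--             continue
--         if b in conns[a] and c in conns[b] and a in conns[c]:
--             nets.add(tuple(sorted([a, b, c])))
--
--     ans = 0
--     for n in nets:
--         if any(c.startswith("t") for c in n):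
--             ans += 1
--     return ans
-- ===== SOURCE B (Python) =====
-- def part1(net_map) -> int:
--     # Build adjacency sets once, then enumerate each triangle exactly once by
--     # its sorted vertex order (u < v < w) via edge iteration + neighbour lookup.
--     adj = {}
--     for a, b in net_map:
--         adj.setdefault(a, set()).add(b)
--         adj.setdefault(b, set()).add(a)
--     ans = 0
--     for u, nbrs in adj.items():
--         for v in nbrs:
--             if u < v:
--                 for w in nbrs:
--                     if v < w and w in adj[v] and (
--                         u.startswith("t") or v.startswith("t") or w.startswith("t")
--                     ):
--                         ans += 1
--     return ans
-- ===== Notes on version B (the rewrite author's own statement) =====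
-- stated objective: faster
-- what changed: Instead of scanning all ordered vertex triples of the full V^3 product and deduplicating sorted triples in a set, B enumerates each triangle exactly once in its sorted order u<v<w by walking each vertex's neighbour set and testing the closing edge with a set lookup, so no dedup set and no V^3 scan exist.
import Mathlib
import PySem

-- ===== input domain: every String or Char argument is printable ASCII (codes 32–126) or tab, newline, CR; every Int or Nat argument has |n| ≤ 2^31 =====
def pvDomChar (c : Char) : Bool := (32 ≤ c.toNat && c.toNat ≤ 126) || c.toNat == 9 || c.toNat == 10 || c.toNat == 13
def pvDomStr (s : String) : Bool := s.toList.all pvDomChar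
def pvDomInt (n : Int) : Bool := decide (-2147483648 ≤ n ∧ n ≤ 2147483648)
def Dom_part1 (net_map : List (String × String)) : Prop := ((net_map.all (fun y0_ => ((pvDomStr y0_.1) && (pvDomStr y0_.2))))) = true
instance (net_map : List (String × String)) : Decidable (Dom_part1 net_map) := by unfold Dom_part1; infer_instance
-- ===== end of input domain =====

-- B enumerates each triangle once in sorted vertex order from adjacency sets instead of
-- scanning all ordered key triples and deduplicating sorted triples in a set (objective: faster).


-- ===== PORT A =====
-- conns[a].add(b) on a defaultdict(set): fetch-with-default-∅ then in-place add, both directions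
def pvConnsStep (d : PySem.Dict String (PySem.Set String)) (p : String × String) :
    PySem.Dict String (PySem.Set String) :=
  (d.modify p.1 PySem.Set.empty (fun s => s.add p.2)).modify p.2 PySem.Set.empty (fun s => s.add p.1)

-- tuple(sorted([a, b, c])); the wildcard branch is unreachable (sorting keeps the length 3)
def pvSort3 (a b c : String) : String × String × String :=
  match PySem.List.sorted [a, b, c] id with
  | x :: y :: z :: _ => (x, y, z)
  | _ => (a, b, c)

def part1 (net_map : List (String × String)) : Int :=
  let conns := net_map.foldl pvConnsStep PySem.Dict.empty
  let ks := conns.keys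
  let nets : PySem.Set (String × String × String) :=
    (ks.flatMap fun a => ks.flatMap fun b => ks.map fun c => (a, b, c)).foldl
      (fun nets t =>
        if t.1 == t.2.1 || t.2.1 == t.2.2 || t.1 == t.2.2 then nets
        else
          if (conns.getD t.1 PySem.Set.empty).contains t.2.1 &&
              (conns.getD t.2.1 PySem.Set.empty).contains t.2.2 &&
              (conns.getD t.2.2 PySem.Set.empty).contains t.1 then
            nets.add (pvSort3 t.1 t.2.1 t.2.2)
          else nets)
      PySem.Set.empty
  List.foldl
    (fun ans n =>
      if PySem.Str.startswith n.1 "t" || PySem.Str.startswith n.2.1 "t" ||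
          PySem.Str.startswith n.2.2 "t" then ans + 1
      else ans)
    0 nets

-- ===== PORT B =====
-- adj.setdefault(x, set()).add(y): fetch-with-default-∅ then in-place add, both directions
def pvAdjStep (d : PySem.Dict String (PySem.Set String)) (p : String × String) :
    PySem.Dict String (PySem.Set String) :=
  (d.modify p.1 PySem.Set.empty (fun s => s.add p.2)).modify p.2 PySem.Set.empty (fun s => s.add p.1)

def part1_alt (net_map : List (String × String)) : Int :=
  let adj := net_map.foldl pvAdjStep PySem.Dict.empty
  adj.items.foldl
    (fun ans us =>
      List.foldl
        (fun ans v =>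
          if us.1 < v then
            List.foldl
              (fun ans w =>
                if decide (v < w) && (adj.getD v PySem.Set.empty).contains w &&
                    (PySem.Str.startswith us.1 "t" || PySem.Str.startswith v "t" ||
                      PySem.Str.startswith w "t") then ans + 1
                else ans)
              ans us.2
          else ans)
        ans us.2)
    0

-- ===== PRECONDITION & SPEC =====
def Spec_part1 (net_map : List (String × String)) (out : Int) : Prop := out = part1_alt net_map
instance (net_map : List (String × String)) (out : Int) : Decidable (Spec_part1 net_map out) := by unfold Spec_part1; infer_instance

-- ===== CLAIM (what is proved, stated in full; the proofs are below) =====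
def Claim_equal_part1 : Prop := ∀ (net_map : List (String × String)), Dom_part1 net_map → Spec_part1 net_map (part1 net_map)

-- ===== LEMMAS AND PROOFS =====

-- proof-side abbreviations
def pvBuild (l : List (String × String)) : PySem.Dict String (PySem.Set String) :=
  l.foldl pvConnsStep PySem.Dict.empty

def pvAdjOf (l : List (String × String)) (u : String) : List String :=
  (pvBuild l).getD u PySem.Set.empty

def pvT3 (x : String × String × String) : Bool :=
  PySem.Str.startswith x.1 "t" || PySem.Str.startswith x.2.1 "t" || PySem.Str.startswith x.2.2 "t"

def pvC1 (t : String × String × String) : Bool :=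
  t.1 == t.2.1 || t.2.1 == t.2.2 || t.1 == t.2.2

def pvC2 (l : List (String × String)) (t : String × String × String) : Bool :=
  ((pvBuild l).getD t.1 PySem.Set.empty).contains t.2.1 &&
    ((pvBuild l).getD t.2.1 PySem.Set.empty).contains t.2.2 &&
    ((pvBuild l).getD t.2.2 PySem.Set.empty).contains t.1

def pvTriples (l : List (String × String)) : List (String × String × String) :=
  (pvBuild l).keys.flatMap fun a =>
    (pvBuild l).keys.flatMap fun b => (pvBuild l).keys.map fun c => (a, b, c)

def pvNets (l : List (String × String)) : PySem.Set (String × String × String) :=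
  (pvTriples l).foldl
    (fun nets t =>
      if pvC1 t then nets
      else if pvC2 l t then nets.add (pvSort3 t.1 t.2.1 t.2.2) else nets)
    PySem.Set.empty

def pvLB (l : List (String × String)) : List (String × String × String) :=
  (pvBuild l).items.flatMap fun us =>
    us.2.flatMap fun v => us.2.map fun w => (us.1, v, w)

def pvQb (l : List (String × String)) (t : String × String × String) : Bool :=
  decide (t.1 < t.2.1) && decide (t.2.1 < t.2.2) &&
    ((pvBuild l).getD t.2.1 PySem.Set.empty).contains t.2.2 && pvT3 t

-- the common characterisation: increasing triangles of the built adjacency with a "t" vertex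
def pvPhi (l : List (String × String)) (x : String × String × String) : Prop :=
  x.1 < x.2.1 ∧ x.2.1 < x.2.2 ∧ x.2.1 ∈ pvAdjOf l x.1 ∧ x.2.2 ∈ pvAdjOf l x.1 ∧
    x.2.2 ∈ pvAdjOf l x.2.1 ∧ pvT3 x = true

theorem pvStep_eq : pvAdjStep = pvConnsStep := rfl

theorem pvMem_getD_step (d : PySem.Dict String (PySem.Set String)) (p : String × String)
    (u v : String) :
    v ∈ (pvConnsStep d p).getD u PySem.Set.empty ↔
      v ∈ d.getD u PySem.Set.empty ∨ (u = p.1 ∧ v = p.2) ∨ (u = p.2 ∧ v = p.1) := by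
  rcases p with ⟨x, y⟩
  simp only [pvConnsStep, PySem.Dict.modify, PySem.Dict.getD_insert]
  split_ifs <;> simp_all [PySem.Set.mem_add] <;> tauto

theorem pvMem_adj_fold (l : List (String × String)) (d : PySem.Dict String (PySem.Set String))
    (u v : String) :
    v ∈ (l.foldl pvConnsStep d).getD u PySem.Set.empty ↔
      v ∈ d.getD u PySem.Set.empty ∨ (u, v) ∈ l ∨ (v, u) ∈ l := by
  induction l generalizing d with
  | nil => simp
  | cons p l ih =>
    simp only [List.foldl_cons, ih, pvMem_getD_step, List.mem_cons, Prod.ext_iff]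
    tauto

theorem pvMem_adj (l : List (String × String)) (u v : String) :
    v ∈ pvAdjOf l u ↔ (u, v) ∈ l ∨ (v, u) ∈ l := by
  have h := pvMem_adj_fold l PySem.Dict.empty u v
  simpa [pvAdjOf, pvBuild, PySem.Dict.getD, PySem.Dict.get?, PySem.Dict.empty,
    PySem.Set.empty] using h

theorem pvAdj_symm (l : List (String × String)) (u v : String) :
    v ∈ pvAdjOf l u ↔ u ∈ pvAdjOf l v := by
  simp only [pvMem_adj]; tauto

theorem pvKeys_insert {ν : Type} (d : PySem.Dict String ν) (k : String) (v : ν) :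
    (d.insert k v).keys = if d.contains k then d.keys else d.keys ++ [k] := by
  unfold PySem.Dict.keys PySem.Dict.insert
  by_cases h : d.contains k = true
  · rw [if_pos h, if_pos h]
    simp only [PySem.Dict.items, List.map_map]
    refine List.map_congr_left fun p _ => ?_
    simp only [Function.comp_apply]
    by_cases hk : (p.1 == k) = true
    · rw [if_pos hk]; exact (eq_of_beq hk).symm
    · rw [if_neg hk]
  · rw [if_neg h, if_neg h]
    simp [PySem.Dict.items]

theorem pvContains_iff {ν : Type} (d : PySem.Dict String ν) (k : String) :
    d.contains k = true ↔ k ∈ d.keys := by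
  simp only [PySem.Dict.contains, PySem.Dict.keys, List.any_eq_true, List.mem_map, beq_iff_eq]

theorem pvMem_keys_insert {ν : Type} (d : PySem.Dict String ν) (k : String) (v : ν)
    (u : String) : u ∈ (d.insert k v).keys ↔ u ∈ d.keys ∨ u = k := by
  rw [pvKeys_insert]
  split_ifs with h
  · constructor
    · exact Or.inl
    · rintro (h' | rfl)
      · exact h'
      · exact (pvContains_iff _ _).1 h
  · simp

theorem pvMem_keys_step (d : PySem.Dict String (PySem.Set String)) (p : String × String)
    (u : String) :
    u ∈ (pvConnsStep d p).keys ↔ u ∈ d.keys ∨ u = p.1 ∨ u = p.2 := by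
  simp only [pvConnsStep, PySem.Dict.modify, pvMem_keys_insert]
  tauto

theorem pvMem_keys_fold (l : List (String × String)) (d : PySem.Dict String (PySem.Set String))
    (u : String) :
    u ∈ (l.foldl pvConnsStep d).keys ↔ u ∈ d.keys ∨ ∃ p ∈ l, u = p.1 ∨ u = p.2 := by
  induction l generalizing d with
  | nil => simp
  | cons p l ih =>
    simp only [List.foldl_cons, ih, pvMem_keys_step, List.mem_cons]
    constructor
    · rintro ((h | h | h) | ⟨q, hq, h⟩)
      · exact Or.inl h
      · exact Or.inr ⟨p, Or.inl rfl, Or.inl h⟩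
      · exact Or.inr ⟨p, Or.inl rfl, Or.inr h⟩
      · exact Or.inr ⟨q, Or.inr hq, h⟩
    · rintro (h | ⟨q, (rfl | hq), h⟩)
      · exact Or.inl (Or.inl h)
      · exact Or.inl (Or.inr h)
      · exact Or.inr ⟨q, hq, h⟩

theorem pvMem_keys (l : List (String × String)) (u : String) :
    u ∈ (pvBuild l).keys ↔ ∃ p ∈ l, u = p.1 ∨ u = p.2 := by
  have h := pvMem_keys_fold l PySem.Dict.empty u
  simpa [pvBuild, PySem.Dict.keys, PySem.Dict.items, PySem.Dict.empty] using h

theorem pvKeys_nodup_insert {ν : Type} (d : PySem.Dict String ν) (k : String) (v : ν)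
    (h : d.keys.Nodup) : (d.insert k v).keys.Nodup := by
  rw [pvKeys_insert]
  split_ifs with hc
  · exact h
  · rw [← List.concat_eq_append, List.nodup_concat]
    exact ⟨fun hm => hc ((pvContains_iff _ _).2 hm), h⟩

theorem pvKeys_nodup_fold (l : List (String × String)) (d : PySem.Dict String (PySem.Set String))
    (h : d.keys.Nodup) : (l.foldl pvConnsStep d).keys.Nodup := by
  induction l generalizing d with
  | nil => exact h
  | cons p l ih =>
    exact ih _ (pvKeys_nodup_insert _ _ _ (pvKeys_nodup_insert _ _ _ h))

theorem pvKeys_nodup (l : List (String × String)) : (pvBuild l).keys.Nodup := by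
  refine pvKeys_nodup_fold l PySem.Dict.empty ?_
  simp [PySem.Dict.keys, PySem.Dict.items, PySem.Dict.empty]

theorem pvVal_nodup_step (d : PySem.Dict String (PySem.Set String)) (p : String × String)
    (h : ∀ u, ((d.getD u PySem.Set.empty : PySem.Set String) : List String).Nodup) (u : String) :
    (((pvConnsStep d p).getD u PySem.Set.empty : PySem.Set String) : List String).Nodup := by
  rcases p with ⟨x, y⟩
  simp only [pvConnsStep, PySem.Dict.modify, PySem.Dict.getD_insert]
  split_ifs <;>
    first
      | exact h u
      | exact PySem.Set.nodup_add _ _ (h _)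
      | exact PySem.Set.nodup_add _ _ (PySem.Set.nodup_add _ _ (h _))

theorem pvVal_nodup (l : List (String × String)) (u : String) : (pvAdjOf l u).Nodup := by
  suffices hgen : ∀ d : PySem.Dict String (PySem.Set String),
      (∀ u, ((d.getD u PySem.Set.empty : PySem.Set String) : List String).Nodup) →
      ∀ u, (((l.foldl pvConnsStep d).getD u PySem.Set.empty : PySem.Set String) : List String).Nodup by
    refine hgen PySem.Dict.empty ?_ u
    intro u
    simp [PySem.Dict.getD, PySem.Dict.get?, PySem.Dict.empty, PySem.Set.empty]
  induction l with
  | nil => intro d hd u; exact hd u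
  | cons p l ih =>
    intro d hd u
    exact ih _ (pvVal_nodup_step d p hd) u

theorem pvEdge_keys (l : List (String × String)) (u v : String) (h : v ∈ pvAdjOf l u) :
    u ∈ (pvBuild l).keys ∧ v ∈ (pvBuild l).keys := by
  rcases (pvMem_adj l u v).1 h with hp | hp
  · exact ⟨(pvMem_keys l u).2 ⟨(u, v), hp, Or.inl rfl⟩, (pvMem_keys l v).2 ⟨(u, v), hp, Or.inr rfl⟩⟩
  · exact ⟨(pvMem_keys l u).2 ⟨(v, u), hp, Or.inr rfl⟩, (pvMem_keys l v).2 ⟨(v, u), hp, Or.inl rfl⟩⟩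

theorem pvFind?_of_keysNodup {ν : Type} (l : List (String × ν)) (u : String) (s : ν)
    (hn : (l.map Prod.fst).Nodup) :
    (u, s) ∈ l ↔ l.find? (fun p => p.1 == u) = some (u, s) := by
  induction l with
  | nil => simp
  | cons q l ih =>
    rcases q with ⟨k, t⟩
    simp only [List.map_cons, List.nodup_cons] at hn
    by_cases hk : (k == u) = true
    · have hku : k = u := eq_of_beq hk
      subst hku
      rw [List.find?_cons_of_pos (by simp)]
      constructor
      · intro h
        rcases List.mem_cons.1 h with h | h
        · rw [h]
        · exact absurd (List.mem_map.2 ⟨(k, s), h, rfl⟩) hn.1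
      · intro h
        have ht2 : (k, t) = (k, s) := by injection h
        rw [← ht2]; exact List.mem_cons_self
    · rw [List.find?_cons_of_neg (by simp [hk])]
      rw [← ih hn.2]
      constructor
      · intro h
        rcases List.mem_cons.1 h with h | h
        · exact absurd (congrArg Prod.fst h).symm (by simpa using hk)
        · exact h
      · intro h; exact List.mem_cons.2 (Or.inr h)

theorem pvMem_items (l : List (String × String)) (u : String) (s : PySem.Set String) :
    (u, s) ∈ (pvBuild l).items ↔ (pvBuild l).get? u = some s := by
  have hn : ((pvBuild l).items.map Prod.fst).Nodup := pvKeys_nodup l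
  constructor
  · intro h
    have hf := (pvFind?_of_keysNodup _ u s hn).1 h
    simp [PySem.Dict.get?, hf]
  · intro h
    simp only [PySem.Dict.get?] at h
    cases hf : (pvBuild l).items.find? (fun p => p.1 == u) with
    | none => rw [hf] at h; simp at h
    | some pr =>
      rw [hf] at h
      simp only [Option.map_some] at h
      have h1 : pr.1 = u := by simpa using List.find?_some hf
      have h2 : pr.2 = s := by injection h
      have : pr = (u, s) := by
        rcases pr with ⟨a, b⟩; simp_all
      rw [this] at hf
      exact List.mem_of_find?_eq_some hf

theorem pvGet?_of_memVal (l : List (String × String)) (u v : String) (h : v ∈ pvAdjOf l u) :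
    (pvBuild l).get? u = some (pvAdjOf l u) := by
  unfold pvAdjOf at *
  cases hg : (pvBuild l).get? u with
  | none =>
    rw [PySem.Dict.getD, hg] at h
    simp [PySem.Set.empty] at h
  | some s => simp [PySem.Dict.getD, hg]

theorem pvMem_foldl_add {α β : Type} [BEq β] [LawfulBEq β] (c1 c2 : α → Bool) (g : α → β)
    (l : List α) (s : PySem.Set β) (x : β) :
    x ∈ l.foldl (fun s t => if c1 t then s else if c2 t then PySem.Set.add s (g t) else s) s ↔
      x ∈ s ∨ ∃ t ∈ l, c1 t = false ∧ c2 t = true ∧ x = g t := by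
  induction l generalizing s with
  | nil => simp
  | cons t l ih =>
    simp only [List.foldl_cons]
    by_cases h1 : c1 t <;> by_cases h2 : c2 t <;>
      simp [h1, h2, ih, PySem.Set.mem_add, List.mem_cons] <;> aesop

theorem pvNodup_foldl_add {α β : Type} [BEq β] [LawfulBEq β] (c1 c2 : α → Bool) (g : α → β)
    (l : List α) (s : PySem.Set β) (h : List.Nodup s) :
    List.Nodup (l.foldl (fun s t => if c1 t then s else if c2 t then PySem.Set.add s (g t) else s) s) := by
  induction l generalizing s with
  | nil => exact h
  | cons t l ih =>
    simp only [List.foldl_cons]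
    by_cases h1 : c1 t <;> by_cases h2 : c2 t <;> simp [h1, h2] <;>
      first
        | exact ih _ h
        | exact ih _ (PySem.Set.nodup_add _ _ h)

theorem pvSort3_eq_self (a b c : String) (hab : a < b) (hbc : b < c) :
    pvSort3 a b c = (a, b, c) := by
  have hPW : List.Pairwise (fun s t : String => id s < id t) [a, b, c] := by
    refine List.Pairwise.cons (fun t ht => ?_)
      (List.Pairwise.cons (fun t ht => ?_) (List.pairwise_singleton _ _))
    · rcases List.mem_cons.1 ht with rfl | ht2
      · exact hab
      · rcases List.mem_cons.1 ht2 with rfl | h3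
        · exact lt_trans hab hbc
        · simp at h3
    · rcases List.mem_cons.1 ht with rfl | ht2
      · exact hbc
      · simp at ht2
  unfold pvSort3
  rw [PySem.List.sorted_eq_of_perm_of_pairwise_lt [a, b, c] [a, b, c] id (List.Perm.refl _) hPW]

theorem pvSort3_spec (a b c : String) (hab : a ≠ b) (hbc : b ≠ c) (hac : a ≠ c) :
    (pvSort3 a b c).1 < (pvSort3 a b c).2.1 ∧ (pvSort3 a b c).2.1 < (pvSort3 a b c).2.2 ∧
      [(pvSort3 a b c).1, (pvSort3 a b c).2.1, (pvSort3 a b c).2.2].Perm [a, b, c] := by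
  have hperm := PySem.List.sorted_perm [a, b, c] (id : String → String) false
  have hpw := PySem.List.sorted_pairwise [a, b, c] (id : String → String)
  have hnd : ([a, b, c] : List String).Nodup := by simp [hab, hbc, hac]
  have hnd' : (PySem.List.sorted [a, b, c] (id : String → String)).Nodup :=
    (hperm.nodup_iff).2 hnd
  have hlen : (PySem.List.sorted [a, b, c] (id : String → String)).length = 3 := by
    simpa using hperm.length_eq
  rcases hLs : PySem.List.sorted [a, b, c] (id : String → String) with _ | ⟨x, _ | ⟨y, _ | ⟨z, rest⟩⟩⟩ <;>
    rw [hLs] at hperm hpw hnd' hlen <;> simp at hlen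
  subst hlen
  simp only [List.pairwise_cons, List.mem_cons, List.not_mem_nil, List.nodup_cons] at hpw hnd'
  have hxyz : pvSort3 a b c = (x, y, z) := by simp [pvSort3, hLs]
  rw [hxyz]
  refine ⟨?_, ?_, hperm⟩
  · show x < y
    refine lt_of_le_of_ne (hpw.1 y (Or.inl rfl)) fun h => hnd'.1 (Or.inl h)
  · show y < z
    refine lt_of_le_of_ne (hpw.2.1 z (Or.inl rfl)) fun h => hnd'.2.1 (Or.inl h)

theorem pvFoldl_if_add_sum {α : Type} (p : α → Prop) [DecidablePred p] (g : α → Int)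
    (l : List α) (a : Int) :
    l.foldl (fun acc x => if p x then acc + g x else acc) a =
      a + (l.map fun x => if p x then g x else 0).sum := by
  induction l generalizing a with
  | nil => simp
  | cons x l ih =>
    by_cases h : p x <;> simp [h, ih, add_assoc]

theorem pvSum_cast {α : Type} (l : List α) (f : α → Nat) :
    (l.map fun x => ((f x : Int))).sum = ((l.map f).sum : Int) := by
  induction l with
  | nil => simp
  | cons x l ih => simp [ih]

theorem pvPart1_eq (l : List (String × String)) :
    part1 l = ((List.filter pvT3 (pvNets l)).length : Int) := by
  rw [← List.countP_eq_length_filter]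
  show List.foldl _ 0 (pvNets l) = _
  rw [PySem.List.foldl_count_if (fun n : String × String × String =>
    PySem.Str.startswith n.1 "t" || PySem.Str.startswith n.2.1 "t" ||
      PySem.Str.startswith n.2.2 "t") (pvNets l) 0]
  rw [zero_add]
  rfl

theorem pvMem_nets (l : List (String × String)) (x : String × String × String) :
    x ∈ pvNets l ↔
      ∃ t ∈ pvTriples l, pvC1 t = false ∧ pvC2 l t = true ∧ x = pvSort3 t.1 t.2.1 t.2.2 := by
  have h := pvMem_foldl_add pvC1 (pvC2 l) (fun t => pvSort3 t.1 t.2.1 t.2.2) (pvTriples l)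
    PySem.Set.empty x
  simpa [pvNets, PySem.Set.empty] using h

theorem pvNodup_nets (l : List (String × String)) :
    (pvNets l : List (String × String × String)).Nodup := by
  exact pvNodup_foldl_add pvC1 (pvC2 l) (fun t => pvSort3 t.1 t.2.1 t.2.2) (pvTriples l)
    PySem.Set.empty (by simp [PySem.Set.empty])

theorem pvMem_triples (l : List (String × String)) (t : String × String × String) :
    t ∈ pvTriples l ↔
      t.1 ∈ (pvBuild l).keys ∧ t.2.1 ∈ (pvBuild l).keys ∧ t.2.2 ∈ (pvBuild l).keys := by
  rcases t with ⟨a, b, c⟩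
  simp only [pvTriples, List.mem_flatMap, List.mem_map, Prod.mk.injEq]
  constructor
  · rintro ⟨a', ha, b', hb, c', hc, rfl, rfl, rfl⟩; exact ⟨ha, hb, hc⟩
  · rintro ⟨ha, hb, hc⟩; exact ⟨a, ha, b, hb, c, hc, rfl, rfl, rfl⟩

theorem pvContains_adj (l : List (String × String)) (u v : String) :
    (((pvBuild l).getD u PySem.Set.empty : PySem.Set String).contains v) = true ↔
      v ∈ pvAdjOf l u := by
  simp [pvAdjOf]

theorem pvNets_iff_phi (l : List (String × String)) (x : String × String × String) :
    (x ∈ pvNets l ∧ pvT3 x = true) ↔ pvPhi l x := by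
  constructor
  · rintro ⟨hx, ht⟩
    rcases (pvMem_nets l x).1 hx with ⟨t, _htr, hc1, hc2, rfl⟩
    rcases t with ⟨a, b, c⟩
    simp only [pvC1, Bool.or_eq_false_iff, beq_eq_false_iff_ne, ne_eq] at hc1
    obtain ⟨⟨hab, hbc⟩, hac⟩ := hc1
    simp only [pvC2, Bool.and_eq_true, pvContains_adj] at hc2
    obtain ⟨⟨hEab, hEbc⟩, hEca⟩ := hc2
    have hEba := (pvAdj_symm l a b).1 hEab
    have hEcb := (pvAdj_symm l b c).1 hEbc
    have hEac := (pvAdj_symm l c a).1 hEca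
    obtain ⟨huv, hvw, hpm⟩ := pvSort3_spec a b c hab hbc hac
    have hedge : ∀ x' ∈ ([a, b, c] : List String), ∀ y' ∈ ([a, b, c] : List String),
        x' ≠ y' → y' ∈ pvAdjOf l x' := by
      intro x' hx' y' hy' hne
      simp only [List.mem_cons, List.not_mem_nil, or_false] at hx' hy'
      rcases hx' with rfl | rfl | rfl <;> rcases hy' with rfl | rfl | rfl <;>
        first
          | exact absurd rfl hne
          | assumption
    have hu : (pvSort3 a b c).1 ∈ [a, b, c] := (hpm.mem_iff).1 (by simp)
    have hv : (pvSort3 a b c).2.1 ∈ [a, b, c] := (hpm.mem_iff).1 (by simp)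
    have hw : (pvSort3 a b c).2.2 ∈ [a, b, c] := (hpm.mem_iff).1 (by simp)
    exact ⟨huv, hvw, hedge _ hu _ hv (ne_of_lt huv),
      hedge _ hu _ hw (ne_of_lt (lt_trans huv hvw)), hedge _ hv _ hw (ne_of_lt hvw), ht⟩
  · rintro ⟨huv, hvw, hEuv, hEuw, hEvw, ht⟩
    refine ⟨(pvMem_nets l x).2 ⟨(x.1, x.2.1, x.2.2), ?_, ?_, ?_, ?_⟩, ht⟩
    · refine (pvMem_triples l _).2 ⟨(pvEdge_keys l x.1 x.2.1 hEuv).1,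
        (pvEdge_keys l x.1 x.2.1 hEuv).2, (pvEdge_keys l x.2.1 x.2.2 hEvw).2⟩
    · simp only [pvC1, Bool.or_eq_false_iff, beq_eq_false_iff_ne, ne_eq]
      exact ⟨⟨ne_of_lt huv, ne_of_lt hvw⟩, ne_of_lt (lt_trans huv hvw)⟩
    · simp only [pvC2, Bool.and_eq_true, pvContains_adj]
      exact ⟨⟨hEuv, hEvw⟩, (pvAdj_symm l x.1 x.2.2).1 hEuw⟩
    · exact (pvSort3_eq_self x.1 x.2.1 x.2.2 huv hvw).symm

theorem pvMem_netsFilter (l : List (String × String)) (x : String × String × String) :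
    x ∈ List.filter pvT3 (pvNets l) ↔ pvPhi l x := by
  rw [List.mem_filter]
  exact pvNets_iff_phi l x

-- ===== B side =====

theorem pvPart1_alt_eq (l : List (String × String)) :
    part1_alt l = ((List.filter (pvQb l) (pvLB l)).length : Int) := by
  rw [← List.countP_eq_length_filter]
  show List.foldl _ 0 (pvBuild l).items = _
  simp only [PySem.List.foldl_count_if, pvFoldl_if_add_sum, PySem.List.foldl_add, zero_add]
  rw [pvLB, List.countP_flatMap]
  simp only [Function.comp_def, List.countP_flatMap, List.countP_map]
  rw [← pvSum_cast]
  refine congrArg List.sum (List.map_congr_left ?_)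
  intro us _
  rw [← pvSum_cast]
  refine congrArg List.sum (List.map_congr_left ?_)
  intro v _
  by_cases h : us.1 < v
  · rw [if_pos h]
    refine congrArg Nat.cast (List.countP_congr ?_)
    intro w _
    simp [pvQb, pvT3, pvBuild, pvStep_eq, h, Bool.and_assoc]
  · rw [if_neg h]
    have h0 : List.countP (fun w => pvQb l (us.1, v, w)) us.2 = 0 := by
      rw [List.countP_eq_zero]
      intro w _
      simp [pvQb, h]
    rw [h0]
    simp

theorem pvMem_LB (l : List (String × String)) (x : String × String × String) :
    x ∈ pvLB l ↔
      ∃ us ∈ (pvBuild l).items, x.2.1 ∈ (us.2 : List String) ∧ x.2.2 ∈ (us.2 : List String) ∧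
        x.1 = us.1 := by
  rcases x with ⟨u, v, w⟩
  simp only [pvLB, List.mem_flatMap, List.mem_map, Prod.mk.injEq]
  constructor
  · rintro ⟨us, hus, v', hv', w', hw', rfl, rfl, rfl⟩
    exact ⟨us, hus, hv', hw', rfl⟩
  · rintro ⟨us, hus, hv, hw, rfl⟩
    exact ⟨us, hus, v, hv, w, hw, rfl, rfl, rfl⟩

theorem pvItems_val (l : List (String × String)) (us : String × PySem.Set String)
    (h : us ∈ (pvBuild l).items) : us.2 = pvAdjOf l us.1 := by
  have := (pvMem_items l us.1 us.2).1 (by rwa [show (us.1, us.2) = us from rfl])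
  simp [pvAdjOf, PySem.Dict.getD, this]

theorem pvMem_LBFilter (l : List (String × String)) (x : String × String × String) :
    x ∈ List.filter (pvQb l) (pvLB l) ↔ pvPhi l x := by
  rw [List.mem_filter, pvMem_LB]
  constructor
  · rintro ⟨⟨us, hus, hv, hw, h1⟩, hq⟩
    have hval := pvItems_val l us hus
    simp only [pvQb, Bool.and_eq_true, decide_eq_true_eq, pvContains_adj] at hq
    exact ⟨h1 ▸ hq.1.1.1, hq.1.1.2, h1 ▸ hval ▸ hv, h1 ▸ hval ▸ hw, hq.1.2, hq.2⟩
  · rintro ⟨huv, hvw, hEuv, hEuw, hEvw, ht⟩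
    constructor
    · refine ⟨(x.1, pvAdjOf l x.1), ?_, hEuv, hEuw, rfl⟩
      exact (pvMem_items l x.1 (pvAdjOf l x.1)).2 (pvGet?_of_memVal l x.1 x.2.1 hEuv)
    · simp only [pvQb, Bool.and_eq_true, decide_eq_true_eq, pvContains_adj]
      exact ⟨⟨⟨huv, hvw⟩, hEvw⟩, ht⟩

theorem pvNodup_LB (l : List (String × String)) : (pvLB l).Nodup := by
  rw [pvLB, List.nodup_flatMap]
  constructor
  · intro us hus
    have hval := pvItems_val l us hus
    have hnd : (us.2 : List String).Nodup := hval ▸ pvVal_nodup l us.1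
    rw [List.nodup_flatMap]
    constructor
    · intro v _
      refine (List.nodup_map_iff ?_).2 hnd
      intro w w' hww'
      simpa using congrArg (fun t => t.2.2) hww'
    · refine hnd.imp ?_
      intro v v' hvv'
      intro t htv htv'
      simp only [List.mem_map] at htv htv'
      rcases htv with ⟨w, _, rfl⟩
      rcases htv' with ⟨w', _, h⟩
      have hv2 : v' = v := by simpa using congrArg (fun t => t.2.1) h
      exact hvv' hv2.symm
  · have hkeys : ((pvBuild l).items.map Prod.fst).Nodup := pvKeys_nodup l
    have hpw : (pvBuild l).items.Pairwise (fun p q => p.1 ≠ q.1) := by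
      rw [List.Nodup, List.pairwise_map] at hkeys
      exact hkeys
    refine hpw.imp ?_
    intro us us' hne
    intro t ht ht'
    simp only [List.mem_flatMap, List.mem_map] at ht ht'
    rcases ht with ⟨v, _, w, _, rfl⟩
    rcases ht' with ⟨v', _, w', _, h⟩
    have hu2 : us'.1 = us.1 := by simpa using congrArg (fun t => t.1) h
    exact hne hu2.symm

-- ===== VERDICT (by name: the statement is the Claim_ definition above) =====
theorem part1_spec : Claim_equal_part1 := by
  intro l _
  unfold Spec_part1
  rw [pvPart1_eq, pvPart1_alt_eq]
  have hperm : (List.filter pvT3 (pvNets l)).Perm (List.filter (pvQb l) (pvLB l)) := by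
    rw [List.perm_ext_iff_of_nodup ((pvNodup_nets l).filter pvT3)
      ((pvNodup_LB l).filter (pvQb l))]
    intro x
    rw [pvMem_netsFilter, pvMem_LBFilter]
  rw [hperm.length_eq]
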